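-- pv_equiv track=rewrite | github.com/rupsaijna/GraphTM-Neurips-25 | Sentiment Polarity/gtm_MPQA.py | count_possible_edges
-- ===== SOURCE A (Python) =====
-- def count_possible_edges(node_id, sequence_length):
--     """Count possible edges for a node based on position."""
--     possible_edges = 0
--     max_offset = 4  # Maximum distance to connect words
--
--     for offset in range(1, max_offset + 1):
--         if node_id + offset < sequence_length:  # Forward edges
--             possible_edges += 1
--         if node_id - offset >= 0:              # Backward edges
--             possible_edges += 1
--     return possible_edges
-- ===== SOURCE B (Python) =====
-- def count_possible_edges(node_id, sequence_length):
--     """Count possible edges for a node based on position (closed form)."""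
--     backward = max(0, min(4, node_id))
--     forward = max(0, min(4, sequence_length - node_id - 1))
--     return backward + forward
-- ===== Notes on version B (the rewrite author's own statement) =====
-- stated objective: simpler
-- what changed: Replaced the offset loop over 1..4 with a closed-form sum of the clamped room on each side: max(0,min(4,node_id)) + max(0,min(4,sequence_length-node_id-1)).
import Mathlib
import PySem

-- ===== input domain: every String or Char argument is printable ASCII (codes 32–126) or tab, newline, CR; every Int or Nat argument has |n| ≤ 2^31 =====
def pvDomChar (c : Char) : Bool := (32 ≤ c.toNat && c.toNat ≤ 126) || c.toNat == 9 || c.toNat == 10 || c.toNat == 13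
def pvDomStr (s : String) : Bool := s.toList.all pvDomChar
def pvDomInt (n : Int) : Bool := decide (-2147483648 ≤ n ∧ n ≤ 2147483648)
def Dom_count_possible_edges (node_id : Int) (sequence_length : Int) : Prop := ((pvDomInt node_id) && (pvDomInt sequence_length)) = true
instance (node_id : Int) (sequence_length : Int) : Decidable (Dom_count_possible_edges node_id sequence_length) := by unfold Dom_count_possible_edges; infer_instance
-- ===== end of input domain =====

-- ===== PORT A =====
-- Port of A: fold over offsets 1..4, adding 1 for each valid forward and backward edge.
def count_possible_edges (node_id : Int) (sequence_length : Int) : Int :=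
  (PySem.List.pyRange 1 5 1).foldl
    (fun possible_edges offset =>
      let possible_edges := if node_id + offset < sequence_length then possible_edges + 1 else possible_edges
      if node_id - offset ≥ 0 then possible_edges + 1 else possible_edges)
    0

-- ===== PORT B =====
-- Port of B: closed form, clamp of the room on each side into [0,4]; simpler, no loop.
def count_possible_edges_alt (node_id : Int) (sequence_length : Int) : Int :=
  max 0 (min 4 node_id) + max 0 (min 4 (sequence_length - node_id - 1))

-- ===== PRECONDITION & SPEC =====
def Spec_count_possible_edges (node_id : Int) (sequence_length : Int) (out : Int) : Prop := out = count_possible_edges_alt node_id sequence_length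
instance (node_id : Int) (sequence_length : Int) (out : Int) : Decidable (Spec_count_possible_edges node_id sequence_length out) := by unfold Spec_count_possible_edges; infer_instance

-- ===== CLAIM (what is proved, stated in full; the proofs are below) =====
def Claim_equal_count_possible_edges : Prop := ∀ (node_id : Int) (sequence_length : Int), Dom_count_possible_edges node_id sequence_length → Spec_count_possible_edges node_id sequence_length (count_possible_edges node_id sequence_length)

-- ===== LEMMAS AND PROOFS =====

-- ===== VERDICT (by name: the statement is the Claim_ definition above) =====
set_option maxHeartbeats 1600000 in
theorem count_possible_edges_spec : Claim_equal_count_possible_edges := by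
  intro node_id sequence_length _
  unfold Spec_count_possible_edges count_possible_edges count_possible_edges_alt
  simp [PySem.List.pyRange, List.range_succ]
  split_ifs <;> omega
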